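-- pv_equiv track=rewrite | github.com/sominw/cs692s-project | utils.py | broadcast_rule
-- ===== SOURCE A (Python) =====
-- def broadcast_rule(shape_a, shape_b):
--
--     if len(shape_a) > len(shape_b):
--         longer_shape, shorter_shape = shape_a, shape_b
--     else:
--         longer_shape, shorter_shape = shape_b, shape_a
--     len_diff = len(longer_shape) - len(shorter_shape)
--     for i in range(len_diff):
--         # pad with leading 1s
--         shorter_shape = (1,) + shorter_shape
--     assert len(shorter_shape) == len(longer_shape)
--     output_shape = list(longer_shape)
--     for i in range(len(output_shape)):
--         assert (shorter_shape[i] == longer_shape[i]) \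
--             or (shorter_shape[i] == 1) \
--             or (longer_shape[i] == 1)
--         output_shape[i] = max(shorter_shape[i], longer_shape[i])
--     return tuple(output_shape)
-- ===== SOURCE B (Python) =====
-- def broadcast_rule(shape_a, shape_b):
--     # Two-pointer merge-style pass from the front: no longer/shorter selection,
--     # no padding. While one shape has more dimensions left than the other, its
--     # dimension is consumed alone (a missing dimension broadcasts as 1, hence
--     # max(d, 1)); once the remaining lengths agree the dimensions are merged.
--     out = []
--     i, j = 0, 0
--     la, lb = len(shape_a), len(shape_b)
--     while i < la or j < lb:
--         if la - i > lb - j: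
--             out.append(max(shape_a[i], 1))
--             i += 1
--         elif lb - j > la - i:
--             out.append(max(shape_b[j], 1))
--             j += 1
--         else:
--             a, b = shape_a[i], shape_b[j]
--             assert a == b or a == 1 or b == 1
--             out.append(max(a, b))
--             i += 1
--             j += 1
--     return tuple(out)
-- ===== Notes on version B (the rewrite author's own statement) =====
-- stated objective: alternative
-- what changed: B replaces A's longer/shorter selection, leading-1 padding loop and indexed in-place update loop by a single two-pointer merge-style pass that peels one dimension per step, consuming only the shape with more remaining dimensions until the remaining lengths agree.
import Mathlib
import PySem

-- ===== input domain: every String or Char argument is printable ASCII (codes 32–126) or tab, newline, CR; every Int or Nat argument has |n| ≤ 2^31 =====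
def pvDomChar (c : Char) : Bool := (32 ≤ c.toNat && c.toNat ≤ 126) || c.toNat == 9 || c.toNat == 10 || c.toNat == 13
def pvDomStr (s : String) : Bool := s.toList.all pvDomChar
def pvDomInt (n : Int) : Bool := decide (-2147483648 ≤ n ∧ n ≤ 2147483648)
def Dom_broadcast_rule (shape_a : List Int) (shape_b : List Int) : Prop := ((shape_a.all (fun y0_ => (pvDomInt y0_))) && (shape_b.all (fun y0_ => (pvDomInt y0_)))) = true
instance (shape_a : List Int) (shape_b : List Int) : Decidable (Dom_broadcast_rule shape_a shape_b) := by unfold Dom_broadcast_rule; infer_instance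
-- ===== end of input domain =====

-- B replaces A's longer/shorter selection + padding loop + indexed update loop by a
-- two-pointer single pass that peels one dimension per step (alternative decomposition).

-- ===== PORT A =====
def broadcast_rule (shape_a : List Int) (shape_b : List Int) : List Int :=
  let p := if shape_a.length > shape_b.length then (shape_a, shape_b) else (shape_b, shape_a)
  let longer_shape := p.1
  let shorter_shape0 := p.2
  let len_diff := longer_shape.length - shorter_shape0.length
  -- pad with leading 1s
  let shorter_shape := (List.range len_diff).foldl (fun s _ => (1 : Int) :: s) shorter_shape0
  -- the asserts always hold on Pre_: indices below are in range, so getD is exact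
  let output_shape := longer_shape
  (List.range output_shape.length).foldl
    (fun out i => out.set i (max (shorter_shape.getD i 0) (longer_shape.getD i 0))) output_shape

-- ===== PORT B =====
-- the while loop of Source B as a tail recursion over the two indices and the accumulator;
-- shape[i] is in range whenever read, so getD is exact; the fuel (an upper bound on the
-- number of loop iterations) only makes the same computation total
def bloopF : Nat → List Int → List Int → Nat → Nat → List Int → List Int
  | 0, _, _, _, _, out => out
  | n + 1, a, b, i, j, out =>
    if i < a.length ∨ j < b.length then
      if a.length - i > b.length - j then
        bloopF n a b (i + 1) j (out ++ [max (a.getD i 0) 1])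
      else if b.length - j > a.length - i then
        bloopF n a b i (j + 1) (out ++ [max (b.getD j 0) 1])
      else
        bloopF n a b (i + 1) (j + 1) (out ++ [max (a.getD i 0) (b.getD j 0)])
    else out

def bloop (shape_a shape_b : List Int) (i j : Nat) (out : List Int) : List Int :=
  bloopF (shape_a.length + shape_b.length) shape_a shape_b i j out

def broadcast_rule_alt (shape_a : List Int) (shape_b : List Int) : List Int :=
  bloop shape_a shape_b 0 0 []

-- ===== PRECONDITION & SPEC =====
-- Pre_ excludes exactly the inputs on which Python A's compatibility assert fails
-- (AssertionError): some trailing-aligned dimension pair is unequal with neither side 1.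
def Pre_broadcast_rule (shape_a : List Int) (shape_b : List Int) : Prop :=
  ∀ i ∈ List.range (max shape_a.length shape_b.length),
    shape_a.reverse.getD i 1 = shape_b.reverse.getD i 1 ∨
    shape_a.reverse.getD i 1 = 1 ∨ shape_b.reverse.getD i 1 = 1
instance (shape_a : List Int) (shape_b : List Int) : Decidable (Pre_broadcast_rule shape_a shape_b) := by unfold Pre_broadcast_rule; infer_instance

def pvWitness_broadcast_rule : List Int × List Int := ([2, 1, 3], [1, 3])

def Spec_broadcast_rule (shape_a : List Int) (shape_b : List Int) (out : List Int) : Prop := out = broadcast_rule_alt shape_a shape_b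
instance (shape_a : List Int) (shape_b : List Int) (out : List Int) : Decidable (Spec_broadcast_rule shape_a shape_b out) := by unfold Spec_broadcast_rule; infer_instance

-- ===== CLAIM (what is proved, stated in full; the proofs are below) =====
def Claim_equal_broadcast_rule : Prop := ∀ (shape_a : List Int) (shape_b : List Int), Dom_broadcast_rule shape_a shape_b → Pre_broadcast_rule shape_a shape_b → Spec_broadcast_rule shape_a shape_b (broadcast_rule shape_a shape_b)

-- ===== LEMMAS AND PROOFS =====

theorem drop_cons_getD (l : List Int) (i : Nat) (h : i < l.length) :
    l.drop i = l.getD i 0 :: l.drop (i + 1) := by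
  rw [List.drop_eq_getElem_cons h, List.getD_eq_getElem _ _ h]

theorem bloopF_eq_zip (a b : List Int) :
    ∀ (n i j : Nat) (out : List Int), a.length - i + (b.length - j) ≤ n →
      bloopF n a b i j out
        = out ++ List.zipWith max
            (List.replicate (max (a.length - i) (b.length - j) - (a.length - i)) (1 : Int)
              ++ a.drop i)
            (List.replicate (max (a.length - i) (b.length - j) - (b.length - j)) (1 : Int)
              ++ b.drop j) := by
  intro n
  induction n with
  | zero =>
      intro i j out h
      have hia : a.length - i = 0 := by omega
      have hjb : b.length - j = 0 := by omega
      rw [bloopF, List.drop_eq_nil_of_le (by omega), List.drop_eq_nil_of_le (by omega)]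
      simp [hia, hjb]
  | succ n ihn =>
      intro i j out h
      by_cases hC : i < a.length ∨ j < b.length
      · rw [bloopF, if_pos hC]
        by_cases h1 : a.length - i > b.length - j
        · rw [if_pos h1, ihn (i+1) j _ (by omega)]
          have hia : i < a.length := by omega
          have e1 : max (a.length - i) (b.length - j) = a.length - i := by omega
          have e2 : max (a.length - (i+1)) (b.length - j) = a.length - (i+1) := by omega
          rw [e1, e2, Nat.sub_self, Nat.sub_self, List.replicate_zero, List.nil_append,
            List.nil_append, drop_cons_getD a i hia]
          have e3 : a.length - i - (b.length - j) = (a.length - (i+1) - (b.length - j)) + 1 := by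
            omega
          rw [e3, List.replicate_succ, List.cons_append, List.zipWith_cons_cons]
          simp
        · rw [if_neg h1]
          by_cases h2 : b.length - j > a.length - i
          · rw [if_pos h2, ihn i (j+1) _ (by omega)]
            have hjb : j < b.length := by omega
            have e1 : max (a.length - i) (b.length - j) = b.length - j := by omega
            have e2 : max (a.length - i) (b.length - (j+1)) = b.length - (j+1) := by omega
            rw [e1, e2, Nat.sub_self, Nat.sub_self, List.replicate_zero, List.nil_append,
              List.nil_append, drop_cons_getD b j hjb]
            have e3 : b.length - j - (a.length - i) = (b.length - (j+1) - (a.length - i)) + 1 := by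
              omega
            rw [e3, List.replicate_succ, List.cons_append, List.zipWith_cons_cons]
            simp [max_comm]
          · rw [if_neg h2, ihn (i+1) (j+1) _ (by omega)]
            have hia : i < a.length := by omega
            have hjb : j < b.length := by omega
            have e0 : b.length - j = a.length - i := by omega
            have e0' : b.length - (j+1) = a.length - (i+1) := by omega
            rw [e0, e0', Nat.max_self, Nat.max_self, Nat.sub_self, Nat.sub_self,
              List.replicate_zero, List.nil_append, List.nil_append, List.nil_append,
              List.nil_append, drop_cons_getD a i hia, drop_cons_getD b j hjb,
              List.zipWith_cons_cons]
            simp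
      · rw [bloopF, if_neg hC]
        rw [List.drop_eq_nil_of_le (by omega), List.drop_eq_nil_of_le (by omega)]
        have hia : a.length - i = 0 := by omega
        have hjb : b.length - j = 0 := by omega
        simp [hia, hjb]

-- A's padding loop builds `replicate d 1 ++ s`.
theorem pad_foldl (d : ℕ) (s : List Int) :
    (List.range d).foldl (fun s _ => (1 : Int) :: s) s = List.replicate d 1 ++ s := by
  induction d with
  | zero => simp
  | succ n ih =>
      rw [List.range_succ, List.foldl_append, ih]
      simp [List.replicate_succ]

-- A's index-assignment loop over a list of length n is a map over the indices.
theorem set_foldl (f : ℕ → Int) :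
    ∀ (n : ℕ) (l : List Int), n ≤ l.length →
      (List.range n).foldl (fun out i => out.set i (f i)) l
        = (List.range n).map f ++ l.drop n := by
  intro n
  induction n with
  | zero => intro l _; simp
  | succ n ih =>
      intro l h
      rw [List.range_succ, List.foldl_append, ih l (by omega)]
      simp only [List.foldl_cons, List.foldl_nil, List.map_append, List.map]
      have hlen : ((List.range n).map f).length = n := by simp
      have hdrop : l.drop n = l[n]'(by omega) :: l.drop (n + 1) := List.drop_eq_getElem_cons (by omega)
      rw [hdrop, List.set_append_right _ _ (by omega), List.append_assoc]
      congr 2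
      simp only [hlen, Nat.sub_self]
      rfl

-- proof-side normal form of port A (longer shape first)
def Af (longer shorter : List Int) : List Int :=
  (List.range longer.length).map (fun i =>
    max ((List.replicate (longer.length - shorter.length) (1 : Int) ++ shorter).getD i 0)
        (longer.getD i 0))

theorem broadcast_rule_eq_Af (a b : List Int) :
    broadcast_rule a b = if a.length > b.length then Af a b else Af b a := by
  by_cases h : a.length > b.length <;>
    simp only [broadcast_rule, h, if_pos, if_neg, not_false_iff] <;>
    · rw [pad_foldl, set_foldl _ _ _ (le_refl _)]
      simp [Af]

-- Af as a zipWith (longer shape on the left)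
theorem Af_eq_zip (a b : List Int) (hle : b.length ≤ a.length) :
    Af a b = List.zipWith max a (List.replicate (a.length - b.length) (1 : Int) ++ b) := by
  apply List.ext_getElem
  · simp [Af]; omega
  · intro i h1 h2
    have hi : i < a.length := by simpa [Af] using h1
    have hp : i < (List.replicate (a.length - b.length) (1 : Int) ++ b).length := by
      simp; omega
    simp only [Af, List.getElem_map, List.getElem_range, List.getElem_zipWith,
      List.getD_eq_getElem _ _ hi, List.getD_eq_getElem _ _ hp]
    exact max_comm _ _

-- ===== VERDICT (by name: the statement is the Claim_ definition above) =====
theorem broadcast_rule_spec : Claim_equal_broadcast_rule := by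
  intro a b _ _
  show broadcast_rule a b = broadcast_rule_alt a b
  rw [broadcast_rule_eq_Af]
  show _ = bloopF (a.length + b.length) a b 0 0 []
  rw [bloopF_eq_zip a b (a.length + b.length) 0 0 [] (by omega), List.nil_append]
  simp only [Nat.sub_zero, List.drop_zero]
  by_cases h : a.length > b.length
  · rw [if_pos h, Af_eq_zip a b (by omega)]
    have h1 : max a.length b.length - a.length = 0 := by omega
    have h2 : max a.length b.length - b.length = a.length - b.length := by omega
    rw [h1, h2, List.replicate_zero, List.nil_append]
  · rw [if_neg h, Af_eq_zip b a (by omega)]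
    have h1 : max a.length b.length - b.length = 0 := by omega
    have h2 : max a.length b.length - a.length = b.length - a.length := by omega
    rw [h1, h2, List.replicate_zero, List.nil_append]
    rw [List.zipWith_comm_of_comm (fun x y => max_comm x y)]
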